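-- pv_equiv track=rewrite | github.com/Gu-Lab-RBL-NCI/scripts-susanna | get-new-motifs.py | isNDuplimotif
-- ===== SOURCE A (Python) =====
-- def isNDuplimotif(motif, sequences):
--     motif_len = len(motif)
--
--     for seq in sequences:
--
--         for i in range(0, len(seq)-motif_len+1):
--             temp_seq = seq[i:i+motif_len]
--
--             for m in range(0, motif_len):
--
--                 if motif[m] in 'N':
--                     temp_seq = temp_seq[:m] + 'N' + temp_seq[m+1:]
--
--             if temp_seq in motif or motif in temp_seq:
--                 return True
--
--     return False
-- ===== SOURCE B (Python) =====
-- def isNDuplimotif(motif, sequences):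
--     # Precompute the non-wildcard positions of the motif once; each window is
--     # then checked by direct per-position comparison (no string rebuilding,
--     # no substring containment).
--     checks = [(m, c) for m, c in enumerate(motif) if c != 'N']
--     L = len(motif)
--     for seq in sequences:
--         for i in range(len(seq) - L + 1):
--             if all(seq[i + m] == c for m, c in checks):
--                 return True
--     return False
-- ===== Notes on version B (the rewrite author's own statement) =====
-- stated objective: simpler
-- what changed: Replaced A's per-window masked-string rebuilding (slicing 'N' into a copy of the window, then substring containment against the motif) by a once-precomputed list of the motif's non-N positions checked directly against the sequence characters, with no intermediate strings.
import Mathlib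
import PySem

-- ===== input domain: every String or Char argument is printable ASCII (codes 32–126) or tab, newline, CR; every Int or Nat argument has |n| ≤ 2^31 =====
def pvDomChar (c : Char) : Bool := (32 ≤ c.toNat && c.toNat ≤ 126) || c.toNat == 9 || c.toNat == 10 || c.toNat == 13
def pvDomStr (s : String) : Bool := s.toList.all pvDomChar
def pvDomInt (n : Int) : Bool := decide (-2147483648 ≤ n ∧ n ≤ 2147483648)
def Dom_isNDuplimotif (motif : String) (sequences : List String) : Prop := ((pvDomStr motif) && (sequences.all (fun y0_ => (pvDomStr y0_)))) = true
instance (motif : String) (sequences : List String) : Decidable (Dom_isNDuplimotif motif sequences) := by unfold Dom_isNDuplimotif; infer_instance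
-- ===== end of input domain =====

-- B precomputes the motif's non-N positions once and compares sequence characters
-- directly, instead of A's per-window masked-copy building + substring containment (objective: simpler).


-- ===== PORT A =====
-- `if motif[m] in 'N'`: motif[m] is a 1-char string; `x in 'N'` is substring membership.
-- motif[m] never goes out of range (m ∈ range(motif_len)); the `none` branch is unreachable.
def pvMaskStep (M : List Char) (t : List Char) (m : Int) : List Char :=
  match PySem.List.pyGet? M m with
  | none => t
  | some c =>
      if PySem.Chars.isIn [c] ['N'] then
        PySem.List.slice t none (some m) ++ 'N' :: PySem.List.slice t (some (m + 1)) none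
      else t

-- inner two loops for one seq: windows i, mask loop over m, containment test; `.any` = early return True
def pvAseq (M : List Char) (mlen : Int) (s : List Char) : Bool :=
  (PySem.List.pyRange 0 ((s.length : Int) - mlen + 1) 1).any (fun i =>
    let temp := PySem.List.slice s (some i) (some (i + mlen))
    let temp := (PySem.List.pyRange 0 mlen 1).foldl (pvMaskStep M) temp
    PySem.Chars.isIn temp M || PySem.Chars.isIn M temp)

def isNDuplimotif (motif : String) (sequences : List String) : Bool :=
  sequences.any (fun seq => pvAseq motif.toList (motif.toList.length : Int) seq.toList)

-- ===== PORT B =====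
-- seq[i+m] is always in range in B's loop; pyGet? = some c is Python's seq[i+m] == c there.
def isNDuplimotif_alt (motif : String) (sequences : List String) : Bool :=
  let checks := (PySem.List.enumerate motif.toList 0).filter (fun p => p.2 ≠ 'N')
  let L : Int := (motif.toList.length : Int)
  sequences.any (fun seq =>
    (PySem.List.pyRange 0 ((seq.toList.length : Int) - L + 1) 1).any (fun i =>
      checks.all (fun p => PySem.List.pyGet? seq.toList (i + p.1) == some p.2)))

-- ===== PRECONDITION & SPEC =====
def Spec_isNDuplimotif (motif : String) (sequences : List String) (out : Bool) : Prop := out = isNDuplimotif_alt motif sequences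
instance (motif : String) (sequences : List String) (out : Bool) : Decidable (Spec_isNDuplimotif motif sequences out) := by unfold Spec_isNDuplimotif; infer_instance

-- ===== CLAIM (what is proved, stated in full; the proofs are below) =====
def Claim_equal_isNDuplimotif : Prop := ∀ (motif : String) (sequences : List String), Dom_isNDuplimotif motif sequences → Spec_isNDuplimotif motif sequences (isNDuplimotif motif sequences)

-- ===== LEMMAS AND PROOFS =====

-- .any respects pointwise-equal bodies
theorem pvAny_congr {α : Type} (l : List α) (f g : α → Bool) (h : ∀ x ∈ l, f x = g x) :
    l.any f = l.any g := by
  induction l with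
  | nil => rfl
  | cons a t ih => simp_all [List.any_cons]

theorem pvMaskStep_eq_set (M t : List Char) (m : Nat) (hM : m < M.length) (ht : m < t.length) :
    pvMaskStep M t (m : Int) = t.set m (if M[m] = 'N' then 'N' else t[m]) := by
  unfold pvMaskStep
  rw [PySem.List.pyGet?_natCast, List.getElem?_eq_getElem hM]
  simp only []
  have hsl1 : PySem.List.slice t none (some (m : Int)) = t.take m := PySem.List.slice_to_natCast t m
  have hsl2 : PySem.List.slice t (some ((m : Int) + 1)) none = t.drop (m + 1) := by
    have : ((m : Int) + 1) = ((m + 1 : Nat) : Int) := by push_cast; ring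
    rw [this, PySem.List.slice_from_natCast]
  by_cases hc : M[m] = 'N'
  · rw [hc]
    have : PySem.Chars.isIn ['N'] ['N'] = true := by decide
    rw [this, if_pos rfl, hsl1, hsl2, List.set_eq_take_cons_drop _ ht]
    simp
  · have hIn : PySem.Chars.isIn [M[m]] ['N'] = false := by
      rw [PySem.Chars.isIn_eq_false_iff]
      intro h
      exact hc (by simpa using h.subset (List.mem_singleton_self _))
    rw [hIn, if_neg hc]
    simp [List.set_getElem_self]

theorem pvMask_fold (M t : List Char) (ht : t.length = M.length) (k : Nat) (hk : k ≤ M.length) :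
    (PySem.List.pyRange 0 (k : Int) 1).foldl (pvMaskStep M) t
      = List.zipWith (fun c d => if c = 'N' then 'N' else d) (M.take k) (t.take k) ++ t.drop k := by
  induction k with
  | zero => simp [PySem.List.pyRange_one_eq_nil]
  | succ k ih =>
    have hk' : k ≤ M.length := Nat.le_of_succ_le hk
    have hkM : k < M.length := hk
    have hkt : k < t.length := by omega
    have hstep : ((k + 1 : Nat) : Int) = (k : Int) + 1 := by push_cast; ring
    rw [hstep, PySem.List.pyRange_one_succ_right (by positivity), List.foldl_append, ih hk']
    simp only [List.foldl_cons, List.foldl_nil]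
    set zw := List.zipWith (fun c d => if c = 'N' then 'N' else d) (M.take k) (t.take k) with hzw
    have hzwlen : zw.length = k := by
      simp [hzw, List.length_zipWith]; omega
    have hprevlen : k < (zw ++ t.drop k).length := by
      simp [hzwlen]; omega
    have hget : (zw ++ t.drop k)[k]'hprevlen = t[k] := by
      rw [List.getElem_append_right (by omega)]
      simp [hzwlen, List.getElem_drop]
    rw [pvMaskStep_eq_set M _ k hkM hprevlen, hget]
    rw [List.set_append]
    rw [if_neg (by omega)]
    have hdropset : (t.drop k).set (k - zw.length) (if M[k] = 'N' then 'N' else t[k])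
        = (if M[k] = 'N' then 'N' else t[k]) :: t.drop (k + 1) := by
      rw [hzwlen, Nat.sub_self, List.drop_eq_getElem_cons hkt]
      rfl
    rw [hdropset]
    have htake : ∀ (l : List Char) (h : k < l.length), l.take (k+1) = l.take k ++ [l[k]] := by
      intro l h
      rw [List.take_add_one, List.getElem?_eq_getElem h]
      rfl
    rw [htake M hkM, htake t hkt, List.zipWith_append (by simp; omega)]
    simp
    exact hzw

theorem pvTest_eq (M t : List Char) (ht : t.length = M.length) :
    (PySem.Chars.isIn t M || PySem.Chars.isIn M t) = (t == M) := by
  by_cases h : t = M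
  · subst h
    simp [PySem.Chars.isIn_iff_infix]
  · have h1 : PySem.Chars.isIn t M = false := by
      rw [PySem.Chars.isIn_eq_false_iff]
      intro hinf
      exact h (hinf.eq_of_length ht)
    have h2 : PySem.Chars.isIn M t = false := by
      rw [PySem.Chars.isIn_eq_false_iff]
      intro hinf
      exact h (hinf.eq_of_length ht.symm).symm
    simp [h1, h2, h]

theorem pvPerWindow (M s : List Char) (i : Nat) (hi : i + M.length ≤ s.length) :
    ((PySem.Chars.isIn ((PySem.List.pyRange 0 (M.length : Int) 1).foldl (pvMaskStep M)
        (PySem.List.slice s (some (i : Int)) (some ((i : Int) + (M.length : Int))))) M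
      || PySem.Chars.isIn M ((PySem.List.pyRange 0 (M.length : Int) 1).foldl (pvMaskStep M)
        (PySem.List.slice s (some (i : Int)) (some ((i : Int) + (M.length : Int)))))))
    = ((PySem.List.enumerate M 0).filter (fun p => p.2 ≠ 'N')).all
        (fun p => PySem.List.pyGet? s ((i : Int) + p.1) == some p.2) := by
  have hslice : PySem.List.slice s (some (i : Int)) (some ((i : Int) + (M.length : Int)))
      = (s.drop i).take M.length := PySem.List.slice_natCast_add s i M.length
  set t := (s.drop i).take M.length with htdef
  have htlen : t.length = M.length := by simp [htdef]; omega
  have hfold : (PySem.List.pyRange 0 (M.length : Int) 1).foldl (pvMaskStep M) t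
      = List.zipWith (fun c d => if c = 'N' then 'N' else d) M t := by
    rw [pvMask_fold M t htlen M.length (le_refl _)]
    simp [List.take_of_length_le (le_of_eq htlen), List.drop_of_length_le (le_of_eq htlen)]
  have hzwlen : (List.zipWith (fun c d => if c = 'N' then 'N' else d) M t).length = M.length := by
    simp [List.length_zipWith, htlen]
  rw [hslice, hfold, pvTest_eq M _ hzwlen]
  have htk : ∀ (k : Nat) (hk : k < M.length), t[k]'(by omega) = s[i + k]'(by omega) := by
    intro k hk
    simp [htdef, List.getElem_take, List.getElem_drop]
  rw [Bool.eq_iff_iff]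
  constructor
  · intro h
    have heq : List.zipWith (fun c d => if c = 'N' then 'N' else d) M t = M := by simpa using h
    simp only [List.all_eq_true, List.mem_filter, PySem.List.mem_enumerate_iff]
    rintro ⟨a, b⟩ ⟨⟨k, hk, hp⟩, hne⟩
    obtain ⟨rfl, rfl⟩ := Prod.mk.inj hp
    have hik : i + k < s.length := by omega
    have harg : ((i : Int) + ((0 : Int) + (k : Int))) = ((i + k : Nat) : Int) := by push_cast; ring
    rw [harg, PySem.List.pyGet?_natCast, List.getElem?_eq_getElem hik]
    have hj := congrArg (fun l => l[k]?) heq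
    simp only [List.getElem?_eq_getElem (by omega : k < (List.zipWith (fun c d => if c = 'N' then 'N' else d) M t).length),
      List.getElem?_eq_getElem hk, List.getElem_zipWith, Option.some.injEq] at hj
    have hMk : M[k] ≠ 'N' := by simpa using hne
    rw [if_neg hMk] at hj
    rw [htk k hk] at hj
    simp [hj]
  · intro h
    have h' : ∀ (k : Nat) (hk : k < M.length), M[k] ≠ 'N' → s[i+k]'(by omega) = M[k] := by
      intro k hk hne
      have hmem : ((0 : Int) + (k : Int), M[k]) ∈ PySem.List.enumerate M 0 := by
        rw [PySem.List.mem_enumerate_iff]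
        exact ⟨k, hk, rfl⟩
      have hall := List.all_eq_true.mp h ((0 : Int) + (k : Int), M[k])
        (List.mem_filter.mpr ⟨hmem, by simpa using hne⟩)
      have harg : ((i : Int) + ((0 : Int) + (k : Int))) = ((i + k : Nat) : Int) := by push_cast; ring
      simp only [harg, PySem.List.pyGet?_natCast] at hall
      rw [List.getElem?_eq_getElem (by omega : i + k < s.length)] at hall
      simpa using hall
    have heq : List.zipWith (fun c d => if c = 'N' then 'N' else d) M t = M := by
      apply List.ext_getElem (by simp [htlen])
      intro j h1 h2
      rw [List.getElem_zipWith]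
      by_cases hN : M[j] = 'N'
      · simp [hN]
      · rw [if_neg hN, htk j (by omega)]
        exact h' j (by omega) hN
    simpa using heq

-- ===== VERDICT (by name: the statement is the Claim_ definition above) =====
theorem isNDuplimotif_spec : Claim_equal_isNDuplimotif := by
  intro motif sequences _
  unfold Spec_isNDuplimotif isNDuplimotif isNDuplimotif_alt pvAseq
  simp only []
  apply pvAny_congr
  intro seq _
  apply pvAny_congr
  intro iv hiv
  rw [PySem.List.mem_pyRange_one] at hiv
  obtain ⟨h0, hlt⟩ := hiv
  obtain ⟨i, rfl⟩ : ∃ i : Nat, iv = (i : Int) := ⟨iv.toNat, (Int.toNat_of_nonneg h0).symm⟩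
  exact pvPerWindow motif.toList seq.toList i (by omega)
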